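-- pv_equiv track=rewrite | github.com/pratham1singh/GFG-geeks-for-geeks-solutions | Minimum indexed character - GFG/minimum-indexed-character.py | minIndexChar
-- ===== SOURCE A (Python) =====
-- def minIndexChar(Str, pat):
--     dict1={}
--     for i in pat:
--        dict1[i]=True
--     n=len(Str)
--     for i in range(n):
--         if Str[i] in dict1:
--             return i
--     return -1
-- ===== SOURCE B (Python) =====
-- def minIndexChar(Str, pat):
--     best = -1
--     for c in pat:
--         idx = Str.find(c)
--         if idx != -1 and (best == -1 or idx < best):
--             best = idx
--     return best
-- ===== Notes on version B (the rewrite author's own statement) =====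
-- stated objective: alternative
-- what changed: Instead of scanning Str once against a dict of pattern characters, B loops over pat and minimises the first-occurrence index Str.find(c) of each pattern character, returning -1 when none occurs.
import Mathlib
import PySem

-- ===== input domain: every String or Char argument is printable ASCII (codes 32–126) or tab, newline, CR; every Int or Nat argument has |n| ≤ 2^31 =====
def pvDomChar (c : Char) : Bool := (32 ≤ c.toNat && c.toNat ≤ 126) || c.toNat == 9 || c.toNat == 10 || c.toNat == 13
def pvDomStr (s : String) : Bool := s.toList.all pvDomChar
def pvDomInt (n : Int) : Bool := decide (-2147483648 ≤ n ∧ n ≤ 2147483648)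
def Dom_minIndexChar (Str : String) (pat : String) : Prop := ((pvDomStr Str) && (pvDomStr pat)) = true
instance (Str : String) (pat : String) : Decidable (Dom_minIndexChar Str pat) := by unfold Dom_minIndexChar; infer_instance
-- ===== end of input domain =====

-- B replaces A's single left-to-right scan of Str (with a dict of pattern chars) by a loop
-- over pat that minimises the first-occurrence index Str.find(c) of each pattern char
-- (objective: alternative decomposition, same result).

-- ===== PORT A =====
-- the 'for i in range(n): if Str[i] in dict1: return i' loop, walking the characters with their index
def pvLoopA (dict1 : PySem.Dict Char Bool) (s : List Char) (i : Nat) : Int :=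
  match s with
  | [] => -1
  | c :: t => if dict1.contains c then (i : Int) else pvLoopA dict1 t (i + 1)

def minIndexChar (Str : String) (pat : String) : Int :=
  let dict1 := pat.toList.foldl (fun d i => d.insert i true) PySem.Dict.empty
  pvLoopA dict1 Str.toList 0

-- ===== PORT B =====
def minIndexChar_alt (Str : String) (pat : String) : Int :=
  pat.toList.foldl (fun best c =>
    let idx := PySem.Str.find Str (String.ofList [c])
    if idx ≠ -1 ∧ (best = -1 ∨ idx < best) then idx else best) (-1)

-- ===== PRECONDITION & SPEC =====
def Spec_minIndexChar (Str : String) (pat : String) (out : Int) : Prop := out = minIndexChar_alt Str pat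
instance (Str : String) (pat : String) (out : Int) : Decidable (Spec_minIndexChar Str pat out) := by unfold Spec_minIndexChar; infer_instance

-- ===== CLAIM (what is proved, stated in full; the proofs are below) =====
def Claim_equal_minIndexChar : Prop := ∀ (Str : String) (pat : String), Dom_minIndexChar Str pat → Spec_minIndexChar Str pat (minIndexChar Str pat)

-- ===== LEMMAS AND PROOFS =====

-- Python's str.find for a single-character needle is the first index of that character, or -1.
theorem pv_find_go_singleton (c : Char) (s : List Char) (k : Nat) :
    PySem.Chars.find.go [c] s k =
      if c ∈ s then (((k + s.findIdx (fun x => x == c) : Nat)) : Int) else -1 := by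
  induction s generalizing k with
  | nil => simp [PySem.Chars.find.go]
  | cons h t ih =>
    by_cases hc : h = c
    · subst hc
      simp [PySem.Chars.find.go, List.isPrefixOf, List.findIdx_cons]
    · have hbe : (c == h) = false := by simp [Ne.symm hc]
      have hbe' : (h == c) = false := by simp [hc]
      simp [PySem.Chars.find.go, List.isPrefixOf, hbe, List.findIdx_cons, hbe', ih]
      by_cases hm : c ∈ t
      · simp [hm]; omega
      · simp [hm]; intro hch; exact absurd hch (Ne.symm hc)

theorem pv_find_singleton (Str : String) (c : Char) :
    PySem.Str.find Str (String.ofList [c]) =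
      if c ∈ Str.toList then ((Str.toList.findIdx (fun x => x == c) : Nat) : Int) else -1 := by
  have : PySem.Str.find Str (String.ofList [c]) = PySem.Chars.find.go [c] Str.toList 0 := by
    simp [PySem.Str.find, PySem.Chars.find, String.toList_ofList]
  rw [this, pv_find_go_singleton]
  simp

-- A's scanning loop returns the first index whose character is in the dict, else -1.
theorem pv_loopA_eq (d : PySem.Dict Char Bool) (s : List Char) (i : Nat) :
    pvLoopA d s i =
      if s.any (fun c => d.contains c) then
        (((i + s.findIdx (fun c => d.contains c) : Nat)) : Int)
      else -1 := by
  induction s generalizing i with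
  | nil => simp [pvLoopA]
  | cons h t ih =>
    by_cases hd : d.contains h
    · simp [pvLoopA, hd, List.findIdx_cons]
    · simp [pvLoopA, hd, List.findIdx_cons, ih]
      split_ifs <;> omega

-- the dict built by A contains exactly the characters of pat
theorem pv_contains_foldl (P : List Char) (c : Char) :
    ((P.foldl (fun d i => d.insert i true) PySem.Dict.empty).contains c) = decide (c ∈ P) := by
  have hkeys : (P.foldl (fun d i => d.insert i true) PySem.Dict.empty).keys = PySem.Set.ofList P := by
    rw [PySem.Dict.keys_foldl_insert (f := fun _ _ => true)]
    simp [PySem.Dict.keys_empty, PySem.Set.update_nil_left]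
  rw [PySem.Dict.contains_eq_decide_mem_keys, hkeys]
  simp [PySem.Set.mem_ofList]

-- B's minimisation fold: if every candidate index is -1 or ≥ k, k is achieved (or already held),
-- then the fold returns k.
theorem pv_fold_eq_k (g : Char → Int) (k : Int) (hk : 0 ≤ k) :
    ∀ (cs : List Char) (best : Int),
      (∀ c ∈ cs, g c = -1 ∨ k ≤ g c) →
      (best = -1 ∨ k ≤ best) →
      ((∃ c ∈ cs, g c = k) ∨ best = k) →
      cs.foldl (fun b c => if g c ≠ -1 ∧ (b = -1 ∨ g c < b) then g c else b) best = k := by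
  intro cs
  induction cs with
  | nil =>
    intro best _ _ h3
    rcases h3 with ⟨c, hc, _⟩ | h
    · exact absurd hc (List.not_mem_nil)
    · simpa using h
  | cons c cs ih =>
    intro best h1 h2 h3
    simp only [List.foldl_cons]
    have hgc := h1 c (List.mem_cons_self)
    have h1' : ∀ x ∈ cs, g x = -1 ∨ k ≤ g x := fun x hx => h1 x (List.mem_cons_of_mem _ hx)
    refine ih _ h1' ?_ ?_
    · split_ifs with hif
      · rcases hgc with h | h
        · exact absurd h hif.1
        · right; exact h
      · exact h2
    · rcases h3 with ⟨c', hc', hgc'⟩ | hbest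
      · rcases List.mem_cons.mp hc' with rfl | hmem
        · right
          split_ifs with hif
        <;> rcases h2 with rfl | hb <;> rcases hgc with h | h <;> omega
        · left; exact ⟨c', hmem, hgc'⟩
      · right
        subst hbest
        split_ifs with hif
        · rcases hgc with h | h <;> rcases hif.2 with h2' | h2' <;> omega
        · rfl

-- when no candidate is found the fold keeps its accumulator
theorem pv_fold_id (g : Char → Int) (cs : List Char) (best : Int)
    (h : ∀ c ∈ cs, g c = -1) :
    cs.foldl (fun b c => if g c ≠ -1 ∧ (b = -1 ∨ g c < b) then g c else b) best = best := by
  induction cs generalizing best with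
  | nil => rfl
  | cons c cs ih =>
    have hc := h c (List.mem_cons_self)
    simp only [List.foldl_cons, hc]
    rw [if_neg (by simp)]
    exact ih _ (fun x hx => h x (List.mem_cons_of_mem _ hx))

-- ===== VERDICT (by name: the statement is the Claim_ definition above) =====
theorem minIndexChar_spec : Claim_equal_minIndexChar := by
  intro Str pat _
  unfold Spec_minIndexChar
  simp only [minIndexChar, minIndexChar_alt]
  set s := Str.toList with hs
  set P := pat.toList with hP
  set D := P.foldl (fun d i => d.insert i true) PySem.Dict.empty with hD
  have hpred : (fun c => D.contains c) = (fun c => decide (c ∈ P)) := by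
    funext c; exact pv_contains_foldl P c
  have hg : ∀ c, PySem.Str.find Str (String.ofList [c]) =
      if c ∈ s then ((s.findIdx (fun x => x == c) : Nat) : Int) else -1 := by
    intro c; rw [pv_find_singleton]
  rw [pv_loopA_eq, hpred]
  by_cases hany : s.any (fun c => decide (c ∈ P))
  · -- some character of s is in P; both sides equal the first such index
    have hk : s.findIdx (fun c => decide (c ∈ P)) < s.length :=
      List.findIdx_lt_length.mpr (by simpa using List.any_eq_true.mp hany)
    set kn := s.findIdx (fun c => decide (c ∈ P)) with hkn
    have hc0 : decide (s[kn] ∈ P) = true := List.findIdx_getElem (w := hk)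
    have hc0P : s[kn] ∈ P := of_decide_eq_true hc0
    have hc0s : s[kn] ∈ s := List.getElem_mem hk
    have hlow : ∀ j, j < kn → (hj : j < s.length) → s[j] ∉ P := by
      intro j hjk hj hmem
      have := List.not_of_lt_findIdx (p := fun c => decide (c ∈ P)) (i := j) hjk
      simp at this
      exact this hmem
    -- every found index of a pattern character is ≥ kn
    have h1 : ∀ c ∈ P, PySem.Str.find Str (String.ofList [c]) = -1 ∨
        (kn : Int) ≤ PySem.Str.find Str (String.ofList [c]) := by
      intro c hcP
      rw [hg c]
      by_cases hcs : c ∈ s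
      · right
        simp only [hcs, if_pos]
        have hm : s.findIdx (fun x => x == c) < s.length :=
          List.findIdx_lt_length.mpr ⟨c, hcs, by simp⟩
        have hsm : s[s.findIdx (fun x => x == c)] = c := by
          have := List.findIdx_getElem (p := fun x => x == c) (xs := s) (w := hm)
          simpa using this
        by_contra hlt
        push_cast at hlt
        have hjk : s.findIdx (fun x => x == c) < kn := by omega
        exact hlow _ hjk hm (by rw [hsm]; exact hcP)
      · left; simp [hcs]
    -- the character s[kn] is first found exactly at kn
    have h2 : PySem.Str.find Str (String.ofList [s[kn]]) = (kn : Int) := by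
      rw [hg _]
      simp only [hc0s, if_pos]
      congr 1
      set m := s.findIdx (fun x => x == s[kn]) with hm
      have hmlt : m < s.length := List.findIdx_lt_length.mpr ⟨s[kn], hc0s, by simp⟩
      have hsm : s[m] = s[kn] := by
        have := List.findIdx_getElem (p := fun x => x == s[kn]) (xs := s) (w := hmlt)
        simpa using this
      rcases lt_trichotomy m kn with h | h | h
      · exact absurd (by rw [hsm]; exact hc0P) (hlow m h hmlt)
      · exact h
      · have := List.not_of_lt_findIdx (p := fun x => x == s[kn]) (i := kn) h
        simp at this
        exact absurd rfl this
    rw [if_pos hany]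
    symm
    simpa using pv_fold_eq_k (fun c => PySem.Str.find Str (String.ofList [c])) ((kn : Int))
      (Int.natCast_nonneg _) P (-1) h1 (Or.inl rfl) (Or.inl ⟨s[kn], hc0P, h2⟩)
  · -- no character of s is in P: A returns -1 and every find is -1
    rw [if_neg hany]
    symm
    apply pv_fold_id
    intro c hcP
    rw [hg c]
    have hcs : c ∉ s := by
      intro hcs
      exact hany (List.any_eq_true.mpr ⟨c, hcs, by simpa using hcP⟩)
    simp [hcs]
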